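-- pv_equiv track=rewrite | github.com/EminatarenX/AFD-C1-HTTP-Validator | automata.py | afd
-- ===== SOURCE A (Python) =====
-- def afd(cadena):
--     metodos = ["GET", "POST", "PUT", "DELETE", "HEAD", "OPTIONS", "PATCH"]
--     versiones = ["HTTP/1.0", "HTTP/1.1", "HTTP/2"]
--
--     partes = cadena.split(" ")
--     if len(partes) != 3:
--         return False, ""
--
--     metodo, url, version = partes
--
--     if metodo not in metodos:
--         return False, ""
--
--     if not url.startswith("/") or " " in url:
--         return False, ""
--
--     if version not in versiones:
--         return False, ""
--
--     if url.startswith("/api/"):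
--         categoria = "API"
--     elif any(url.endswith(ext) for ext in [".html", ".css", ".jpg", ".png", ".js"]):
--         categoria = "Recurso Estático"
--     elif any(url.endswith(ext) for ext in [".php", ".asp", ".jsp"]):
--         categoria = "Recurso Dinámico"
--     else:
--         categoria = "Otro"
--
--     return True, categoria
-- ===== SOURCE B (Python) =====
-- def afd(cadena):
--     partes = cadena.split(" ")
--     if len(partes) != 3:
--         return False, ""
--     metodo, url, version = partes
--     if metodo not in ("GET", "POST", "PUT", "DELETE", "HEAD", "OPTIONS", "PATCH"):
--         return False, ""
--     if not url.startswith("/") or " " in url: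
--         return False, ""
--     if version not in ("HTTP/1.0", "HTTP/1.1", "HTTP/2"):
--         return False, ""
--     if url.startswith("/api/"):
--         return True, "API"
--     # one pass over the url: extension = characters after the last '.'
--     buf = ""
--     seen = False
--     for ch in url:
--         if ch == ".":
--             seen = True
--             buf = ""
--         else:
--             buf = buf + ch
--     ext = buf if seen else ""
--     tabla = {"html": "Recurso Estático", "css": "Recurso Estático",
--              "jpg": "Recurso Estático", "png": "Recurso Estático",
--              "js": "Recurso Estático", "php": "Recurso Dinámico",
--              "asp": "Recurso Dinámico", "jsp": "Recurso Dinámico"}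
--     return True, tabla.get(ext, "Otro")
-- ===== Notes on version B (the rewrite author's own statement) =====
-- stated objective: alternative
-- what changed: Classification no longer runs eight endswith suffix scans: one pass over the url extracts the text after the last dot, which is looked up in a dict mapping extensions to categories; matched guards stay, early returns replace the categoria variable.
import Mathlib
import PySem

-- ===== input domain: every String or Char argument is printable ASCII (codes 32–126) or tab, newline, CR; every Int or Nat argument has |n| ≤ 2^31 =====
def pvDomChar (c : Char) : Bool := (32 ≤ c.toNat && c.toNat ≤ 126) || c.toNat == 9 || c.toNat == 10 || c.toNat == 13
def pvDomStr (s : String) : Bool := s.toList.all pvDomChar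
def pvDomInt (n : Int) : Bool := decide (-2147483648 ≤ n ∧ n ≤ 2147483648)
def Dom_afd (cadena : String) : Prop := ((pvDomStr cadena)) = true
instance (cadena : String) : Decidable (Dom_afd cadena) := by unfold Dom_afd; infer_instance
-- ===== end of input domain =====

-- B replaces the eight endswith suffix scans of the classification by a single pass over the
-- url extracting the text after the last dot plus one table lookup (objective: alternative).


-- ===== PORT A =====
def afd (cadena : String) : Bool × String :=
  let metodos : List String := ["GET", "POST", "PUT", "DELETE", "HEAD", "OPTIONS", "PATCH"]
  let versiones : List String := ["HTTP/1.0", "HTTP/1.1", "HTTP/2"]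
  match PySem.Str.split? cadena " " with
  | none => (false, "")        -- unreachable: the separator " " is nonempty
  | some partes =>
    if partes.length ≠ 3 then (false, "")
    else
      match partes with
      | [metodo, url, version] =>
        if ¬ metodos.contains metodo then (false, "")
        else if ¬ PySem.Str.startswith url "/" || PySem.Str.isIn " " url then (false, "")
        else if ¬ versiones.contains version then (false, "")
        else
          let categoria : String :=
            if PySem.Str.startswith url "/api/" then "API"
            else if [".html", ".css", ".jpg", ".png", ".js"].any
                (fun ext => PySem.Str.endswith url ext) then "Recurso Estático"
            else if [".php", ".asp", ".jsp"].any
                (fun ext => PySem.Str.endswith url ext) then "Recurso Dinámico"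
            else "Otro"
          (true, categoria)
      | _ => (false, "")       -- unreachable: partes has length 3 here

-- ===== PORT B =====
def afd_alt (cadena : String) : Bool × String :=
  match PySem.Str.split? cadena " " with
  | none => (false, "")        -- unreachable: the separator " " is nonempty
  | some partes =>
    if partes.length = 3 then
      -- metodo, url, version = partes (safe: the length was just checked, so the
      -- .getD defaults are never used)
      let metodo := partes.getD 0 ""
      let url := partes.getD 1 ""
      let version := partes.getD 2 ""
      if ¬ ["GET", "POST", "PUT", "DELETE", "HEAD", "OPTIONS", "PATCH"].contains metodo then
        (false, "")
      else if ¬ PySem.Str.startswith url "/" || PySem.Str.isIn " " url then (false, "")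
      else if ¬ ["HTTP/1.0", "HTTP/1.1", "HTTP/2"].contains version then (false, "")
      else if PySem.Str.startswith url "/api/" then (true, "API")
      else
        -- one pass over the url: buf = chars since the last '.', seen = a '.' occurred
        let st : Bool × List Char :=
          url.toList.foldl
            (fun (acc : Bool × List Char) ch =>
              if ch = '.' then (true, []) else (acc.1, acc.2 ++ [ch]))
            (false, [])
        let ext : List Char := if st.1 then st.2 else []
        let tabla : PySem.Dict (List Char) String :=
          PySem.Dict.ofList
            [("html".toList, "Recurso Estático"), ("css".toList, "Recurso Estático"),
             ("jpg".toList, "Recurso Estático"), ("png".toList, "Recurso Estático"),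
             ("js".toList, "Recurso Estático"), ("php".toList, "Recurso Dinámico"),
             ("asp".toList, "Recurso Dinámico"), ("jsp".toList, "Recurso Dinámico")]
        (true, PySem.Dict.getD tabla ext "Otro")
    else (false, "")           -- len(partes) != 3

-- ===== PRECONDITION & SPEC =====
def Spec_afd (cadena : String) (out : Bool × String) : Prop := out = afd_alt cadena
instance (cadena : String) (out : Bool × String) : Decidable (Spec_afd cadena out) := by unfold Spec_afd; infer_instance

-- ===== CLAIM (what is proved, stated in full; the proofs are below) =====
def Claim_equal_afd : Prop := ∀ (cadena : String), Dom_afd cadena → Spec_afd cadena (afd cadena)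

-- ===== LEMMAS AND PROOFS =====

-- the fold's value characterised: '(if seen then buf else []) = e' means the url ends in '.'+e
-- (for a nonempty, dot-free e), with the generalised accumulator clause for the induction
theorem afd_fold_char (e : List Char) (he : '.' ∉ e) (hne : e ≠ []) :
    ∀ (u : List Char) (b : Bool) (acc : List Char),
      ((if (u.foldl (fun (acc : Bool × List Char) ch =>
              if ch = '.' then (true, []) else (acc.1, acc.2 ++ [ch])) (b, acc)).1
        then (u.foldl (fun (acc : Bool × List Char) ch =>
              if ch = '.' then (true, []) else (acc.1, acc.2 ++ [ch])) (b, acc)).2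
        else []) = e)
      ↔ (('.' :: e) <:+ u ∨ ('.' ∉ u ∧ b = true ∧ acc ++ u = e)) := by
  intro u
  induction u with
  | nil =>
    intro b acc
    constructor
    · intro h
      cases b with
      | false => exact absurd (by simpa using h.symm) hne
      | true => exact Or.inr ⟨by simp, rfl, by simpa using h⟩
    · rintro (h | ⟨_, hb, hacc⟩)
      · exact absurd h (by simp)
      · subst hb; simpa using hacc
  | cons c u ih =>
    intro b acc
    rw [List.foldl_cons]
    by_cases hc : c = '.'
    · subst hc
      rw [if_pos rfl, ih true []]
      constructor
      · rintro (h | ⟨hnd, _, hu⟩)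
        · exact Or.inl (h.trans (List.suffix_cons _ _))
        · simp only [List.nil_append] at hu
          exact Or.inl (hu ▸ List.suffix_refl _)
      · rintro (h | ⟨hnd, _, _⟩)
        · rcases List.suffix_cons_iff.mp h with h | h
          · have : e = u := by injection h
            subst this
            exact Or.inr ⟨he, rfl, by simp⟩
          · exact Or.inl h
        · exact absurd (List.mem_cons_self) hnd
    · rw [if_neg hc, ih b (acc ++ [c])]
      constructor
      · rintro (h | ⟨hnd, hb, hu⟩)
        · exact Or.inl (h.trans (List.suffix_cons _ _))
        · refine Or.inr ⟨?_, hb, by simpa using hu⟩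
          simp only [List.mem_cons]
          rintro (h | h)
          · exact hc h.symm
          · exact hnd h
      · rintro (h | ⟨hnd, hb, hu⟩)
        · rcases List.suffix_cons_iff.mp h with h | h
          · exfalso
            have h1 : '.' = c := by injection h
            exact hc h1.symm
          · exact Or.inl h
        · refine Or.inr ⟨fun hh => hnd (List.mem_cons_of_mem _ hh), hb, by simpa using hu⟩

-- endswith '.'+e is exactly 'the extracted extension equals e'
theorem afd_ends_iff (url : String) (e : List Char) (he : '.' ∉ e) (hne : e ≠ []) :
    (PySem.Chars.endswith url.toList ('.' :: e) = true)
      ↔ ((if (url.toList.foldl (fun (acc : Bool × List Char) ch =>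
              if ch = '.' then (true, []) else (acc.1, acc.2 ++ [ch])) (false, [])).1
          then (url.toList.foldl (fun (acc : Bool × List Char) ch =>
              if ch = '.' then (true, []) else (acc.1, acc.2 ++ [ch])) (false, [])).2
          else []) = e) := by
  rw [PySem.Chars.endswith_iff, afd_fold_char e he hne url.toList false []]
  simp

-- ===== VERDICT (by name: the statement is the Claim_ definition above) =====
theorem afd_spec : Claim_equal_afd := by
  intro cadena _
  unfold Spec_afd
  cases h : PySem.Str.split? cadena " " with
  | none => simp only [afd, afd_alt, h]
  | some partes =>
    rcases partes with _ | ⟨m, _ | ⟨u, _ | ⟨v, _ | ⟨d, t⟩⟩⟩⟩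
    · simp only [afd, afd_alt, h]; rfl
    · simp only [afd, afd_alt, h]; rfl
    · simp only [afd, afd_alt, h]; rfl
    · -- the length-3 case
      simp only [afd, afd_alt, h]
      rw [if_neg (show ¬ (([m, u, v] : List String).length ≠ 3) from by simp),
        if_pos (show ([m, u, v] : List String).length = 3 from rfl),
        show ([m, u, v] : List String).getD 0 "" = m from rfl,
        show ([m, u, v] : List String).getD 1 "" = u from rfl,
        show ([m, u, v] : List String).getD 2 "" = v from rfl]
      have key : ∀ e : List Char, '.' ∉ e → e ≠ [] →
          PySem.Chars.endswith u.toList ('.' :: e)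
            = decide ((if (u.toList.foldl (fun (acc : Bool × List Char) ch =>
                  if ch = '.' then (true, []) else (acc.1, acc.2 ++ [ch])) (false, [])).1
              then (u.toList.foldl (fun (acc : Bool × List Char) ch =>
                  if ch = '.' then (true, []) else (acc.1, acc.2 ++ [ch])) (false, [])).2
              else []) = e) := by
        intro e he hne
        have hiff := afd_ends_iff u e he hne
        rw [← decide_eq_true_eq (p := _ = e)] at hiff
        exact Bool.coe_iff_coe.mp hiff
      have hclass :
          (if ([".html", ".css", ".jpg", ".png", ".js"].any
                (fun ext => PySem.Str.endswith u ext)) then ("Recurso Estático" : String)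
           else if ([".php", ".asp", ".jsp"].any
                (fun ext => PySem.Str.endswith u ext)) then "Recurso Dinámico"
           else "Otro")
          = PySem.Dict.getD (PySem.Dict.ofList
              [("html".toList, "Recurso Estático"), ("css".toList, "Recurso Estático"),
               ("jpg".toList, "Recurso Estático"), ("png".toList, "Recurso Estático"),
               ("js".toList, "Recurso Estático"), ("php".toList, "Recurso Dinámico"),
               ("asp".toList, "Recurso Dinámico"), ("jsp".toList, "Recurso Dinámico")])
              (if (u.toList.foldl (fun (acc : Bool × List Char) ch =>
                  if ch = '.' then (true, []) else (acc.1, acc.2 ++ [ch])) (false, [])).1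
               then (u.toList.foldl (fun (acc : Bool × List Char) ch =>
                  if ch = '.' then (true, []) else (acc.1, acc.2 ++ [ch])) (false, [])).2
               else []) "Otro" := by
        simp only [List.any_cons, List.any_nil, Bool.or_false, PySem.Str.endswith_eq,
          String.reduceToList,
          key ['h', 't', 'm', 'l'] (by decide) (by decide),
          key ['c', 's', 's'] (by decide) (by decide),
          key ['j', 'p', 'g'] (by decide) (by decide),
          key ['p', 'n', 'g'] (by decide) (by decide),
          key ['j', 's'] (by decide) (by decide),
          key ['p', 'h', 'p'] (by decide) (by decide),
          key ['a', 's', 'p'] (by decide) (by decide),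
          key ['j', 's', 'p'] (by decide) (by decide)]
        set X : List Char := (if (u.toList.foldl (fun (acc : Bool × List Char) ch =>
              if ch = '.' then (true, []) else (acc.1, acc.2 ++ [ch])) (false, [])).1
          then (u.toList.foldl (fun (acc : Bool × List Char) ch =>
              if ch = '.' then (true, []) else (acc.1, acc.2 ++ [ch])) (false, [])).2
          else []) with hX
        clear_value X
        by_cases c1 : X = ['h', 't', 'm', 'l']; · subst c1; decide
        by_cases c2 : X = ['c', 's', 's']; · subst c2; decide
        by_cases c3 : X = ['j', 'p', 'g']; · subst c3; decide
        by_cases c4 : X = ['p', 'n', 'g']; · subst c4; decide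
        by_cases c5 : X = ['j', 's']; · subst c5; decide
        by_cases c6 : X = ['p', 'h', 'p']; · subst c6; decide
        by_cases c7 : X = ['a', 's', 'p']; · subst c7; decide
        by_cases c8 : X = ['j', 's', 'p']; · subst c8; decide
        have n1 : ((['h', 't', 'm', 'l'] : List Char) == X) = false := beq_eq_false_iff_ne.mpr (Ne.symm c1)
        have n2 : ((['c', 's', 's'] : List Char) == X) = false := beq_eq_false_iff_ne.mpr (Ne.symm c2)
        have n3 : ((['j', 'p', 'g'] : List Char) == X) = false := beq_eq_false_iff_ne.mpr (Ne.symm c3)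
        have n4 : ((['p', 'n', 'g'] : List Char) == X) = false := beq_eq_false_iff_ne.mpr (Ne.symm c4)
        have n5 : ((['j', 's'] : List Char) == X) = false := beq_eq_false_iff_ne.mpr (Ne.symm c5)
        have n6 : ((['p', 'h', 'p'] : List Char) == X) = false := beq_eq_false_iff_ne.mpr (Ne.symm c6)
        have n7 : ((['a', 's', 'p'] : List Char) == X) = false := beq_eq_false_iff_ne.mpr (Ne.symm c7)
        have n8 : ((['j', 's', 'p'] : List Char) == X) = false := beq_eq_false_iff_ne.mpr (Ne.symm c8)
        simp [PySem.Dict.getD, PySem.Dict.get?, PySem.Dict.ofList, PySem.Dict.update,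
          PySem.Dict.insert, PySem.Dict.empty, PySem.Dict.contains, List.find?,
          c1, c2, c3, c4, c5, c6, c7, c8, n1, n2, n3, n4, n5, n6, n7, n8]
      rw [hclass]
      split_ifs <;> rfl
    · -- length ≥ 4
      simp only [afd, afd_alt, h]
      rw [if_pos (show (m :: u :: v :: d :: t : List String).length ≠ 3 from by
            simp only [List.length_cons]; omega),
        if_neg (show ¬ (m :: u :: v :: d :: t : List String).length = 3 from by
            simp only [List.length_cons]; omega)]
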